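-- pv_equiv track=rewrite | github.com/champ0925/ai-mock-interview | ai-service/app/rag/loader.py | _split_into_questions
-- ===== SOURCE A (Python) =====
-- from typing import List
--
-- def _split_into_questions(raw: str) -> List[str]:
--     """按空行切分，同时去掉 # 注释行"""
--     # 先按空行分段
--     blocks = []
--     current: List[str] = []
--     for line in raw.splitlines():
--         stripped = line.strip()
--         if stripped.startswith("#"):
--             continue  # 注释行
--         if stripped == "":
--             if current:
--                 blocks.append("\n".join(current).strip())
--                 current = []
--         else:
--             current.append(line)
--     if current:
--         blocks.append("\n".join(current).strip())
--     return [b for b in blocks if b]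
-- ===== SOURCE B (Python) =====
-- from typing import List
--
-- def _split_into_questions(raw: str) -> List[str]:
--     # Filter comment lines first, then split the remaining lines into
--     # maximal runs of non-blank lines (span scan), join each run and strip.
--     lines = [l for l in raw.splitlines() if not l.strip().startswith("#")]
--     out: List[str] = []
--     i, n = 0, len(lines)
--     while i < n:
--         if lines[i].strip() == "":
--             i += 1
--             continue
--         j = i
--         while j < n and lines[j].strip() != "":
--             j += 1
--         block = "\n".join(lines[i:j]).strip()
--         if block:
--             out.append(block)
--         i = j
--     return out
-- ===== Notes on version B (the rewrite author's own statement) =====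
-- stated objective: idiomatic
-- what changed: Replaces the running accumulator/flush state machine with a filter-comments-first pipeline followed by a span scan that extracts each maximal run of non-blank lines directly.
import Mathlib
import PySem

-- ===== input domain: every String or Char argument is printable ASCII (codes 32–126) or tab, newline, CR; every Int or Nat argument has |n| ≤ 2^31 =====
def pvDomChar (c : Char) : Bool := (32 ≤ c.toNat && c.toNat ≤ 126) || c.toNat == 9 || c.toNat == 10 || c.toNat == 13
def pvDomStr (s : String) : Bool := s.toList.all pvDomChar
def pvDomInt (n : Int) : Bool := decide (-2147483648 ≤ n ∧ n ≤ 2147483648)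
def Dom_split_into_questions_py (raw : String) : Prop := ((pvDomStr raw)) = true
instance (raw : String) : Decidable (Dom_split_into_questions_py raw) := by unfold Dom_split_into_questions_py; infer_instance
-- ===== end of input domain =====

-- B replaces A's accumulator/flush state machine with a comment-filter then a span scan
-- over maximal non-blank runs (more idiomatic decomposition; same O(n) cost).


-- ===== PORT A =====
-- line.strip().startswith("#")
def pvIsComment (l : String) : Bool := PySem.Str.startswith (PySem.Str.strip l) "#"
-- line.strip() == ""
def pvIsBlank (l : String) : Bool := PySem.Str.strip l == ""
-- "\n".join(cur).strip()
def pvJoinStrip (cur : List String) : String := PySem.Str.strip (PySem.Str.join "\n" cur)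

-- the final flush after the loop ('if current: blocks.append(...)')
def pvFlush (st : List String × List String) : List String :=
  if st.2 ≠ [] then st.1 ++ [pvJoinStrip st.2] else st.1

-- one iteration of A's for-loop over the state (blocks, current)
def pvStepA (st : List String × List String) (line : String) : List String × List String :=
  if pvIsComment line then st
  else if pvIsBlank line then
    if st.2 ≠ [] then (st.1 ++ [pvJoinStrip st.2], []) else st
  else (st.1, st.2 ++ [line])

def split_into_questions_py (raw : String) : List String :=
  (pvFlush ((PySem.Str.splitlines raw).foldl pvStepA ([], []))).filter (fun b => b ≠ "")

-- ===== PORT B =====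
-- span scan over the comment-filtered lines: each maximal non-blank run becomes a block
def pvSpanB (lines : List String) : List String :=
  match lines with
  | [] => []
  | l :: ls =>
    if pvIsBlank l then pvSpanB ls
    else
      let run := ls.takeWhile (fun x => !pvIsBlank x)
      let rest := ls.dropWhile (fun x => !pvIsBlank x)
      let block := pvJoinStrip (l :: run)
      (if block ≠ "" then [block] else []) ++ pvSpanB rest
termination_by lines.length
decreasing_by
  all_goals simp only [List.length_cons]
  · omega
  · have := List.length_dropWhile_le (fun x => !pvIsBlank x) ls; omega

def split_into_questions_py_alt (raw : String) : List String :=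
  pvSpanB ((PySem.Str.splitlines raw).filter (fun l => !pvIsComment l))

-- ===== PRECONDITION & SPEC =====
def Spec_split_into_questions_py (raw : String) (out : List String) : Prop := out = split_into_questions_py_alt raw
instance (raw : String) (out : List String) : Decidable (Spec_split_into_questions_py raw out) := by unfold Spec_split_into_questions_py; infer_instance

-- ===== CLAIM (what is proved, stated in full; the proofs are below) =====
def Claim_equal_split_into_questions_py : Prop := ∀ (raw : String), Dom_split_into_questions_py raw → Spec_split_into_questions_py raw (split_into_questions_py raw)

-- ===== LEMMAS AND PROOFS =====

-- blocks emitted by A's loop run from pending state `cur`, including the final flush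
def pvRunsA (lines : List String) (cur : List String) : List String :=
  match lines with
  | [] => if cur ≠ [] then [pvJoinStrip cur] else []
  | l :: ls =>
    if pvIsComment l then pvRunsA ls cur
    else if pvIsBlank l then
      if cur ≠ [] then pvJoinStrip cur :: pvRunsA ls [] else pvRunsA ls cur
    else pvRunsA ls (cur ++ [l])

theorem pvFoldA_eq (ls : List String) : ∀ (blocks cur : List String),
    pvFlush (ls.foldl pvStepA (blocks, cur)) = blocks ++ pvRunsA ls cur := by
  induction ls with
  | nil =>
    intro blocks cur
    simp only [List.foldl_nil, pvFlush, pvRunsA]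
    split <;> simp
  | cons l ls ih =>
    intro blocks cur
    simp only [List.foldl_cons, pvStepA, pvRunsA]
    split_ifs with h1 h2 h3
    · exact ih blocks cur
    · rw [ih]; simp
    · exact ih blocks cur
    · exact ih blocks (cur ++ [l])

-- A's loop ignores comment lines, so its blocks equal those on the filtered lines
theorem pvRunsA_filter (ls : List String) : ∀ cur,
    pvRunsA ls cur = pvRunsA (ls.filter (fun l => !pvIsComment l)) cur := by
  induction ls with
  | nil => intro cur; rfl
  | cons l ls ih =>
    intro cur
    by_cases h : pvIsComment l
    · simp only [pvRunsA, h, if_true, List.filter_cons, Bool.not_true]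
      simp only [Bool.false_eq_true, if_false]
      exact ih cur
    · have h' : pvIsComment l = false := eq_false_of_ne_true h
      simp only [List.filter_cons, h', Bool.not_false, if_pos, pvRunsA,
        Bool.false_eq_true, if_false]
      split_ifs <;> simp [ih]

-- pushing a fully non-blank, non-comment run into the pending state
theorem pvRunsA_push (run : List String) : ∀ rest cur,
    (∀ x ∈ run, pvIsBlank x = false ∧ pvIsComment x = false) →
    pvRunsA (run ++ rest) cur = pvRunsA rest (cur ++ run) := by
  induction run with
  | nil => intro rest cur _; simp
  | cons r rs ih =>
    intro rest cur h
    have hr := h r (by simp)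
    simp only [List.cons_append, pvRunsA, hr.1, hr.2, Bool.false_eq_true, if_false]
    rw [ih rest (cur ++ [r]) (fun x hx => h x (by simp [hx]))]
    simp

-- main: A's filtered blocks on comment-free lines are exactly B's span scan
theorem pvRunsA_eq_spanB (n : Nat) : ∀ (ls : List String), ls.length ≤ n →
    (∀ x ∈ ls, pvIsComment x = false) →
    (pvRunsA ls []).filter (fun b => b ≠ "") = pvSpanB ls := by
  induction n with
  | zero =>
    intro ls hlen _
    have : ls = [] := List.eq_nil_of_length_eq_zero (Nat.le_zero.mp hlen)
    subst this; simp [pvRunsA, pvSpanB]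
  | succ n ih =>
    intro ls hlen hnc
    match ls with
    | [] => simp [pvRunsA, pvSpanB]
    | l :: ls' =>
      have hl := hnc l (by simp)
      by_cases hb : pvIsBlank l
      · have h1 : pvRunsA (l :: ls') [] = pvRunsA ls' [] := by
          simp [pvRunsA, hl, hb]
        rw [h1, pvSpanB, if_pos hb]
        exact ih ls' (by simp at hlen; omega) (fun x hx => hnc x (by simp [hx]))
      · have hrun : ∀ x ∈ l :: ls'.takeWhile (fun x => !pvIsBlank x),
            pvIsBlank x = false ∧ pvIsComment x = false := by
          intro x hx
          rcases List.mem_cons.mp hx with hx | hx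
          · exact ⟨by simpa [hx] using hb, by simpa [hx] using hl⟩
          · refine ⟨by simpa using List.mem_takeWhile_imp hx, ?_⟩
            exact hnc x (List.mem_cons.mpr (Or.inr ((List.takeWhile_sublist _).subset hx)))
        have h1 : pvRunsA (l :: ls') []
            = pvRunsA (ls'.dropWhile (fun x => !pvIsBlank x))
                (l :: ls'.takeWhile (fun x => !pvIsBlank x)) := by
          conv_lhs => rw [show l :: ls'
            = (l :: ls'.takeWhile (fun x => !pvIsBlank x)) ++ ls'.dropWhile (fun x => !pvIsBlank x) by
              simp [List.takeWhile_append_dropWhile]]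
          exact pvRunsA_push _ _ [] hrun
        rw [pvSpanB, if_neg (by simp [hb])]
        simp only []
        rw [h1]
        have hdroplen : (ls'.dropWhile (fun x => !pvIsBlank x)).length ≤ n := by
          have := List.length_dropWhile_le (fun x => !pvIsBlank x) ls'
          simp at hlen; omega
        have hdropnc : ∀ x ∈ ls'.dropWhile (fun x => !pvIsBlank x), pvIsComment x = false :=
          fun x hx => hnc x (List.mem_cons.mpr (Or.inr ((List.dropWhile_sublist _).subset hx)))
        match hdrop : ls'.dropWhile (fun x => !pvIsBlank x) with
        | [] =>
          rw [pvRunsA, if_pos (by simp)]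
          rw [show pvSpanB [] = [] by simp [pvSpanB]]
          rw [List.filter_cons]
          split_ifs <;> simp_all
        | d :: ds =>
          have hd : pvIsBlank d = true := by
            have hne : ls'.dropWhile (fun x => !pvIsBlank x) ≠ [] := by rw [hdrop]; simp
            have hh := List.head_dropWhile_not (fun x => !pvIsBlank x) hne
            simp only [hdrop, List.head_cons] at hh
            simpa using hh
          have hdnc := hdropnc d (by rw [hdrop]; simp)
          rw [pvRunsA]
          simp only [hdnc, hd, Bool.false_eq_true, if_false, if_true,
            ne_eq, List.cons_ne_nil, not_false_eq_true]
          rw [List.filter_cons]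
          have hds : (pvRunsA ds []).filter (fun b => b ≠ "") = pvSpanB ds := by
            refine ih ds ?_ (fun x hx => hdropnc x (by rw [hdrop]; simp [hx]))
            rw [hdrop] at hdroplen; simp at hdroplen; omega
          rw [show pvSpanB (d :: ds) = pvSpanB ds by rw [pvSpanB, if_pos hd]]
          rw [hds]
          split_ifs <;> simp_all

-- ===== VERDICT (by name: the statement is the Claim_ definition above) =====
theorem split_into_questions_py_spec : Claim_equal_split_into_questions_py := by
  intro raw _
  unfold Spec_split_into_questions_py split_into_questions_py split_into_questions_py_alt
  rw [pvFoldA_eq, List.nil_append, pvRunsA_filter]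
  exact pvRunsA_eq_spanB _ _ le_rfl
    (fun x hx => by simpa using (List.mem_filter.mp hx).2)
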